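-- pv_equiv track=rewrite | github.com/xander27/adevent22python | day5/__main__.py | separate_state_and_command_lines
-- ===== SOURCE A (Python) =====
-- def separate_state_and_command_lines(lines):
--     state = []
--     commands = []
--     commands_mode = False
--     for line in lines:
--         if len(line.strip()) == 0:
--             commands_mode = True
--         elif commands_mode:
--             commands.append(line)
--         else:
--             state.append(line)
--     return state, commands
-- ===== SOURCE B (Python) =====
-- def separate_state_and_command_lines(lines):
--     lines = list(lines)
--     idx = next((i for i, l in enumerate(lines) if len(l.strip()) == 0), len(lines))
--     state = lines[:idx]
--     commands = [l for l in lines[idx + 1:] if len(l.strip()) != 0]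
--     return state, commands
-- ===== Notes on version B (the rewrite author's own statement) =====
-- stated objective: alternative
-- what changed: Replaces A's single stateful loop carrying a commands_mode flag by find-first-blank-index, then slicing for the state section and a filtered comprehension over the tail for the commands.
import Mathlib
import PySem

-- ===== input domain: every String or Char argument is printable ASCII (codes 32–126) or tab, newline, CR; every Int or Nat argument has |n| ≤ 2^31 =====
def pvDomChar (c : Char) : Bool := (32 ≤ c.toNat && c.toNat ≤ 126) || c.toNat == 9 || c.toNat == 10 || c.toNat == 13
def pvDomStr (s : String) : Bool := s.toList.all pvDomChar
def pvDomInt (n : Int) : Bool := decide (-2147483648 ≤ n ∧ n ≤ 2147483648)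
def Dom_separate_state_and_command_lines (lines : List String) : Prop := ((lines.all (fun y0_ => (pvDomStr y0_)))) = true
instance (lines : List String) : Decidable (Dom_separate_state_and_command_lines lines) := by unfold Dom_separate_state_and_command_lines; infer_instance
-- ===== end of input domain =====

-- ===== PORT A =====
-- A: one loop carrying (state, commands, commands_mode); blank line flips the flag.
def separate_state_and_command_lines (lines : List String) : List String × List String :=
  let r := lines.foldl
    (fun (acc : List String × List String × Bool) line =>
      if PySem.Str.len (PySem.Str.strip line) == 0 then
        (acc.1, acc.2.1, true)
      else if acc.2.2 then
        (acc.1, acc.2.1 ++ [line], acc.2.2)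
      else
        (acc.1 ++ [line], acc.2.1, acc.2.2))
    ([], [], false)
  (r.1, r.2.1)

-- ===== PORT B =====
-- B: index of the first blank line (defaulting to the length), then a slice and a filtered tail.
def separate_state_and_command_lines_alt (lines : List String) : List String × List String :=
  let idx : Nat := lines.findIdx (fun l => PySem.Str.len (PySem.Str.strip l) == 0)
  (PySem.List.slice lines none (some (idx : Int)),
   (PySem.List.slice lines (some ((idx : Int) + 1)) none).filter
     (fun l => !(PySem.Str.len (PySem.Str.strip l) == 0)))

-- ===== PRECONDITION & SPEC =====
def Spec_separate_state_and_command_lines (lines : List String) (out : List String × List String) : Prop := out = separate_state_and_command_lines_alt lines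
instance (lines : List String) (out : List String × List String) : Decidable (Spec_separate_state_and_command_lines lines out) := by unfold Spec_separate_state_and_command_lines; infer_instance

-- ===== CLAIM (what is proved, stated in full; the proofs are below) =====
def Claim_equal_separate_state_and_command_lines : Prop := ∀ (lines : List String), Dom_separate_state_and_command_lines lines → Spec_separate_state_and_command_lines lines (separate_state_and_command_lines lines)

-- ===== LEMMAS AND PROOFS =====

-- abbreviations used only in the proofs
def pvBlank (l : String) : Bool := PySem.Str.len (PySem.Str.strip l) == 0

def pvStep (acc : List String × List String × Bool) (line : String) :
    List String × List String × Bool :=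
  if pvBlank line then
    (acc.1, acc.2.1, true)
  else if acc.2.2 then
    (acc.1, acc.2.1 ++ [line], acc.2.2)
  else
    (acc.1 ++ [line], acc.2.1, acc.2.2)

-- once commands_mode is true, the loop only appends the non-blank lines to commands
theorem pvFold_true (ls : List String) (st cm : List String) :
    ls.foldl pvStep (st, cm, true) = (st, cm ++ ls.filter (fun l => !pvBlank l), true) := by
  induction ls generalizing cm with
  | nil => simp
  | cons l ls ih =>
    by_cases h : pvBlank l = true
    · simp [pvStep, h, ih]
    · simp [pvStep, h, ih]

-- before the first blank line, the loop accumulates state; the whole fold in terms of findIdx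
theorem pvFold_false (ls : List String) (st : List String) :
    ((ls.foldl pvStep (st, [], false)).1, (ls.foldl pvStep (st, [], false)).2.1) =
      (st ++ ls.take (ls.findIdx pvBlank),
       (ls.drop (ls.findIdx pvBlank + 1)).filter (fun l => !pvBlank l)) := by
  induction ls generalizing st with
  | nil => simp
  | cons l ls ih =>
    by_cases h : pvBlank l = true
    · have hf : (l :: ls).findIdx pvBlank = 0 := by
        simp [List.findIdx_cons, h]
      simp [List.foldl_cons, pvStep, h, hf, pvFold_true]
    · have hf : (l :: ls).findIdx pvBlank = ls.findIdx pvBlank + 1 := by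
        simp [List.findIdx_cons, h]
      have h' : pvBlank l = false := by simpa using h
      simp only [List.foldl_cons, pvStep, h', Bool.false_eq_true, if_false, hf]
      rw [ih (st ++ [l])]
      simp [List.take_succ_cons, List.drop_succ_cons]

-- ===== VERDICT (by name: the statement is the Claim_ definition above) =====
theorem separate_state_and_command_lines_spec : Claim_equal_separate_state_and_command_lines := by
  intro lines _
  show _ = _
  unfold separate_state_and_command_lines separate_state_and_command_lines_alt
  have hfold : lines.foldl
      (fun (acc : List String × List String × Bool) line =>
        if PySem.Str.len (PySem.Str.strip line) == 0 then
          (acc.1, acc.2.1, true)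
        else if acc.2.2 then
          (acc.1, acc.2.1 ++ [line], acc.2.2)
        else
          (acc.1 ++ [line], acc.2.1, acc.2.2))
      ([], [], false) = lines.foldl pvStep ([], [], false) := rfl
  simp only [hfold]
  have h := pvFold_false lines []
  have hidx : lines.findIdx (fun l => PySem.Str.len (PySem.Str.strip l) == 0)
      = lines.findIdx pvBlank := rfl
  rw [hidx, PySem.List.slice_to_natCast]
  have hfrom : PySem.List.slice lines (some ((lines.findIdx pvBlank : Int) + 1)) none
      = lines.drop (lines.findIdx pvBlank + 1) := by
    have := PySem.List.slice_from_natCast lines (lines.findIdx pvBlank + 1)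
    simpa using this
  rw [hfrom]
  have h1 := congrArg Prod.fst h
  have h2 := congrArg Prod.snd h
  simp only at h1 h2
  exact Prod.ext (by simpa using h1) (by simpa [pvBlank] using h2)
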